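-- pv_equiv track=rewrite | github.com/Bhoomika-Tomar/DSA_with_python | Sliding-window/Moving-stone-until-consecutive.py | numMovesStonesII
-- ===== SOURCE A (Python) =====
-- from typing import List
--
-- def numMovesStonesII(stones: List[int]) -> List[int]:
--
--     stones.sort()
--     n = len(stones)
--
--     max_moves = max(
--         stones[-1] - stones[1] + 1 - (n-1),
--         stones[-2] - stones[0] + 1 - (n-1)
--     )
--
--     min_moves = n
--     j = 0
--
--     for i in range (n):
--         while j < n and stones[j] - stones[i] + 1 <= n:
--             j += 1
--
--         already_inside = j - i
--
--         if already_inside == n - 1 and stones[j-1] - stones[i] + 1 == n -1: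
--             min_moves = min(min_moves, 2)
--
--         else:
--             min_moves = min(min_moves, n- already_inside)
--
--     return [min_moves, max_moves]
-- ===== SOURCE B (Python) =====
-- from typing import List
--
-- def numMovesStonesII(stones: List[int]) -> List[int]:
--     # Note: like A, this sorts `stones` in place (same observable side effect).
--     stones.sort()
--     n = len(stones)
--
--     max_moves = max(stones[n - 1] - stones[1], stones[n - 2] - stones[0]) - (n - 2)
--
--     def upper(x):
--         # CPython's bisect_right loop, hand-written since A imports no bisect
--         lo, hi = 0, n
--         while lo < hi:
--             mid = (lo + hi) // 2
--             if x < stones[mid]: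
--                 hi = mid
--             else:
--                 lo = mid + 1
--         return lo
--
--     def cand(i):
--         j = upper(stones[i] + n - 1)
--         if j == i + n - 1 and stones[i + n - 2] - stones[i] == n - 2:
--             return 2
--         return n - (j - i)
--
--     min_moves = min([n] + [cand(i) for i in range(n)])
--     return [min_moves, max_moves]
-- ===== Notes on version B (the rewrite author's own statement) =====
-- stated objective: alternative
-- what changed: min_moves is computed as min over a list of per-index candidates, each obtained by an independent binary search (bisect_right) for the window end instead of A's stateful monotone forward pointer, and max_moves factors the common offset out of the max.
import Mathlib
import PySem

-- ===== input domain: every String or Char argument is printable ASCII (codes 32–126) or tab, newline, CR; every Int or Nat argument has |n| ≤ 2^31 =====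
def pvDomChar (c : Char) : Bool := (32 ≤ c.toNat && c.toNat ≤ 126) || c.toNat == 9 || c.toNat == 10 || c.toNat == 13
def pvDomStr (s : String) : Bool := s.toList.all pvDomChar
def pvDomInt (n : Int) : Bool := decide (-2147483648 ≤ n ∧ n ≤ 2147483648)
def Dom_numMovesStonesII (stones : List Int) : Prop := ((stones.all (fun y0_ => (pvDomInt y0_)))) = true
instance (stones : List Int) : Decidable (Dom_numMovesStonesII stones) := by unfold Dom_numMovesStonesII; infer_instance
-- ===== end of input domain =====

-- B computes min_moves as the min of a list of per-index candidates, each found by an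
-- independent binary search, instead of A's stateful monotone forward pointer (alternative
-- algorithm, similar cost). Both A and B sort `stones` in place; the equivalence proved
-- here is about the return value (the in-place sort is the same in both).

-- ===== PORT A =====
-- the inner `while j < n and stones[j] - stones[i] + 1 <= n: j += 1` loop;
-- under Pre_ both indices are in range, so pyGetD's default is never the result
-- (Python short-circuits `j < n` before reading stones[j]; pyGetD is total so
-- evaluating the conjunction is harmless).
def advanceA (s : List Int) (n j i : Nat) : Nat :=
  if _h : j < n ∧ PySem.List.pyGetD s (j : Int) 0 - PySem.List.pyGetD s (i : Int) 0 + 1 ≤ (n : Int) then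
    advanceA s n (j + 1) i
  else j
termination_by n - j
decreasing_by omega

-- one iteration of A's `for i in range(n)` loop; state = (j, min_moves)
def stepA (s : List Int) (n : Nat) (st : Nat × Int) (i : Nat) : Nat × Int :=
  let j := advanceA s n st.1 i
  let inside : Int := (j : Int) - (i : Int)
  if inside = (n : Int) - 1 ∧
      PySem.List.pyGetD s ((j : Int) - 1) 0 - PySem.List.pyGetD s (i : Int) 0 + 1 = (n : Int) - 1 then
    (j, min st.2 2)
  else
    (j, min st.2 ((n : Int) - inside))

def numMovesStonesII (stones : List Int) : List Int :=
  let s := PySem.List.sorted stones id          -- stones.sort()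
  let n := s.length
  let maxMoves : Int :=
    max (PySem.List.pyGetD s (-1) 0 - PySem.List.pyGetD s (1 : Int) 0 + 1 - ((n : Int) - 1))
        (PySem.List.pyGetD s (-2) 0 - PySem.List.pyGetD s (0 : Int) 0 + 1 - ((n : Int) - 1))
  let st := (List.range n).foldl (stepA s n) (0, (n : Int))
  [st.2, maxMoves]

-- ===== PORT B =====
-- Source B's `cand(i)`: its hand-written lo/hi `upper` is verbatim CPython's bisect_right
-- loop, which PySem.List.bisectRight implements step for step.
def candB (s : List Int) (n i : Nat) : Int :=
  let j := PySem.List.bisectRight s (PySem.List.pyGetD s (i : Int) 0 + (n : Int) - 1)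
  if (j : Int) = (i : Int) + (n : Int) - 1 ∧
      PySem.List.pyGetD s ((i : Int) + (n : Int) - 2) 0 - PySem.List.pyGetD s (i : Int) 0 = (n : Int) - 2 then
    2
  else
    (n : Int) - ((j : Int) - (i : Int))

def numMovesStonesII_alt (stones : List Int) : List Int :=
  let s := PySem.List.sorted stones id          -- stones.sort()
  let n := s.length
  let maxMoves : Int :=
    max (PySem.List.pyGetD s ((n : Int) - 1) 0 - PySem.List.pyGetD s (1 : Int) 0)
        (PySem.List.pyGetD s ((n : Int) - 2) 0 - PySem.List.pyGetD s (0 : Int) 0) - ((n : Int) - 2)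
  -- min([n] + [cand(i) for i in range(n)])
  let minMoves := ((List.range n).map (candB s n)).foldl min ((n : Int))
  [minMoves, maxMoves]

-- ===== PRECONDITION & SPEC =====
-- A raises IndexError (stones[-1] / stones[1] / stones[-2]) on lists of fewer than two
-- stones; exactly those inputs are excluded (B raises there too).
def Pre_numMovesStonesII (stones : List Int) : Prop := 2 ≤ stones.length
instance (stones : List Int) : Decidable (Pre_numMovesStonesII stones) := by
  unfold Pre_numMovesStonesII; infer_instance

def pvWitness_numMovesStonesII : List Int := [3, 7, 5]

def Spec_numMovesStonesII (stones : List Int) (out : List Int) : Prop := out = numMovesStonesII_alt stones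
instance (stones : List Int) (out : List Int) : Decidable (Spec_numMovesStonesII stones out) := by
  unfold Spec_numMovesStonesII; infer_instance

-- ===== CLAIM (what is proved, stated in full; the proofs are below) =====
def Claim_equal_numMovesStonesII : Prop := ∀ (stones : List Int), Dom_numMovesStonesII stones → Pre_numMovesStonesII stones → Spec_numMovesStonesII stones (numMovesStonesII stones)

-- ===== LEMMAS AND PROOFS =====

theorem pyGetD_idx (s : List Int) (j : Nat) (hj : j < s.length) :
    PySem.List.pyGetD s (j : Int) 0 = s[j] := by
  simp [List.getD_eq_getElem?_getD, List.getElem?_eq_getElem hj]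

-- bisectRight is monotone in the probe (from its spec alone)
theorem bisectRight_mono (s : List Int) (hs : s.Pairwise (· ≤ ·)) {x y : Int} (hxy : x ≤ y) :
    PySem.List.bisectRight s x ≤ PySem.List.bisectRight s y := by
  obtain ⟨hxle, hxlo, hxhi⟩ := PySem.List.bisectRight_spec s x hs
  obtain ⟨hyle, hylo, hyhi⟩ := PySem.List.bisectRight_spec s y hs
  by_contra h
  push Not at h
  have hj : PySem.List.bisectRight s y < s.length := lt_of_lt_of_le h hxle
  have h1 := hxlo _ hj h
  have h2 := hyhi _ hj le_rfl
  omega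

-- A's while loop, started at or before the bisection point, stops exactly at it
theorem advanceA_eq (s : List Int) (hs : s.Pairwise (· ≤ ·)) (i : Nat) (x : Int)
    (hx : x = PySem.List.pyGetD s (i : Int) 0 + (s.length : Int) - 1) :
    ∀ j, j ≤ PySem.List.bisectRight s x →
      advanceA s s.length j i = PySem.List.bisectRight s x := by
  obtain ⟨hle, hlo, hhi⟩ := PySem.List.bisectRight_spec s x hs
  intro j hj
  induction hk : s.length - j using Nat.strong_induction_on generalizing j with
  | _ k ih =>
    rw [advanceA]
    by_cases hjB : j = PySem.List.bisectRight s x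
    · subst hjB
      rw [dif_neg]
      rintro ⟨h1, h2⟩
      have h3 := hhi _ h1 le_rfl
      have h4 := pyGetD_idx s _ h1
      omega
    · have hjlt : j < PySem.List.bisectRight s x := lt_of_le_of_ne hj hjB
      have hjn : j < s.length := lt_of_lt_of_le hjlt hle
      have hsj := pyGetD_idx s j hjn
      have hcond : PySem.List.pyGetD s (j : Int) 0 - PySem.List.pyGetD s (i : Int) 0 + 1 ≤ (s.length : Int) := by
        have := hlo j hjn hjlt
        omega
      rw [dif_pos ⟨hjn, hcond⟩]
      exact ih (s.length - (j + 1)) (by omega) (j + 1) hjlt rfl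

-- A's fold body, at the bisection point, produces B's candidate; the invariant propagates
theorem loop_eq (s : List Int) (hs : s.Pairwise (· ≤ ·)) :
    ∀ (a j : Nat) (m : Int),
      (a < s.length → j ≤ PySem.List.bisectRight s (PySem.List.pyGetD s (a : Int) 0 + (s.length : Int) - 1)) →
      ((List.range' a (s.length - a)).foldl (stepA s s.length) (j, m)).2 =
        (List.range' a (s.length - a)).foldl (fun m i => min m (candB s s.length i)) m := by
  intro a j m hj
  induction hk : s.length - a using Nat.strong_induction_on generalizing a j m with
  | _ k ih =>
    match k, hk with
    | 0, hk => simp [List.range']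
    | k' + 1, hk =>
      have han : a < s.length := by omega
      rw [List.range'_succ, List.foldl_cons, List.foldl_cons]
      have hadv := advanceA_eq s hs a _ rfl j (hj han)
      set B := PySem.List.bisectRight s (PySem.List.pyGetD s (a : Int) 0 + (s.length : Int) - 1) with hB
      have hstep : stepA s s.length (j, m) a = (B, min m (candB s s.length a)) := by
        unfold stepA candB
        rw [hadv, ← hB]
        by_cases hc : ((B : Int) = (a : Int) + (s.length : Int) - 1 ∧
            PySem.List.pyGetD s ((a : Int) + (s.length : Int) - 2) 0 - PySem.List.pyGetD s (a : Int) 0 = (s.length : Int) - 2)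
        · have harg : ((B : Int) - 1) = (a : Int) + (s.length : Int) - 2 := by omega
          rw [if_pos ⟨by omega, by rw [harg]; omega⟩, if_pos hc]
        · rw [if_neg ?_, if_neg hc]
          rintro ⟨h1, h2⟩
          refine hc ⟨by omega, ?_⟩
          have harg : (a : Int) + (s.length : Int) - 2 = (B : Int) - 1 := by omega
          rw [harg]; omega
      rw [hstep]
      have hnext : a + 1 < s.length →
          B ≤ PySem.List.bisectRight s (PySem.List.pyGetD s ((a + 1 : Nat) : Int) 0 + (s.length : Int) - 1) := by
        intro h1
        apply bisectRight_mono s hs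
        have hga := pyGetD_idx s a han
        have hga1 := pyGetD_idx s (a + 1) h1
        have := (List.pairwise_iff_getElem.mp hs) a (a + 1) han h1 (by omega)
        omega
      have hs1 : s.length - (a + 1) = k' := by omega
      exact ih k' (by omega) (a + 1) B (min m (candB s s.length a)) hnext hs1

theorem max_moves_eq (a b c : Int) : max (a + 1 - (c - 1)) (b + 1 - (c - 1)) = max a b - (c - 2) := by
  rcases le_total a b with h | h <;>
    [rw [max_eq_right h, max_eq_right (by omega : a + 1 - (c - 1) ≤ b + 1 - (c - 1))];
     rw [max_eq_left h, max_eq_left (by omega : b + 1 - (c - 1) ≤ a + 1 - (c - 1))]] <;> omega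

-- A's negative indices and B's n-1 / n-2 read the same elements on a list of length ≥ 2
theorem pyGetD_neg_eq (s : List Int) (h : 2 ≤ s.length) :
    PySem.List.pyGetD s (-1) 0 = PySem.List.pyGetD s ((s.length : Int) - 1) 0 ∧
    PySem.List.pyGetD s (-2) 0 = PySem.List.pyGetD s ((s.length : Int) - 2) 0 := by
  have h1 : ((s.length : Int) - 1) = ((s.length - 1 : Nat) : Int) := by omega
  have h2 : ((s.length : Int) - 2) = ((s.length - 2 : Nat) : Int) := by omega
  have e1 : PySem.List.pyGet? s (-((1 : Nat) : Int)) = s[s.length - 1]? :=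
    PySem.List.pyGet?_neg_natCast s 1 (by omega) (by omega)
  have e2 : PySem.List.pyGet? s (-((2 : Nat) : Int)) = s[s.length - 2]? :=
    PySem.List.pyGet?_neg_natCast s 2 (by omega) (by omega)
  norm_num at e1 e2
  constructor
  · rw [h1]; simp [PySem.List.pyGetD, e1]
  · rw [h2]; simp [PySem.List.pyGetD, e2]

-- ===== VERDICT (by name: the statement is the Claim_ definition above) =====
theorem numMovesStonesII_spec : Claim_equal_numMovesStonesII := by
  unfold Claim_equal_numMovesStonesII
  intro stones _hdom hpre
  unfold Spec_numMovesStonesII numMovesStonesII numMovesStonesII_alt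
  have hs : (PySem.List.sorted stones id).Pairwise (· ≤ ·) := by
    simpa using PySem.List.sorted_pairwise stones id
  set s := PySem.List.sorted stones id with hsdef
  unfold Pre_numMovesStonesII at hpre
  have hlen : 2 ≤ s.length := by
    rw [hsdef, PySem.List.length_sorted]; omega
  have hmin := loop_eq s hs 0 0 ((s.length : Int)) (by intro _; omega)
  simp only [Nat.sub_zero] at hmin
  rw [← List.range_eq_range'] at hmin
  obtain ⟨hn1, hn2⟩ := pyGetD_neg_eq s hlen
  simp only []
  rw [hmin, List.foldl_map, hn1, hn2, max_moves_eq]
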